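-- pv_equiv track=rewrite | github.com/ldayton/Dippy | src/dippy/cli/sed.py | _extract_inplace_files
-- ===== SOURCE A (Python) =====
-- FLAGS_WITH_ARG = frozenset({"-e", "--expression", "-f", "--file"})
--
-- def _extract_inplace_files(tokens: list[str]) -> list[str]:
--     """Extract input files that will be modified by -i flag."""
--     files = []
--     i = 1
--     found_script = False
--     has_e_flag = False
--
--     # First pass: check if -e is used
--     for t in tokens[1:]:
--         if t == "-e" or t == "--expression" or t.startswith("--expression="):
--             has_e_flag = True
--             break
--
--     # Second pass: extract files
--     i = 1
--     while i < len(tokens):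
--         t = tokens[i]
--
--         # Skip flags with arguments
--         if t in FLAGS_WITH_ARG:
--             i += 2
--             continue
--         if t.startswith("--expression=") or t.startswith("--file="):
--             i += 1
--             continue
--
--         # Skip -i variants
--         if t == "-i" or t.startswith("-i") or t.startswith("--in-place"):
--             i += 1
--             continue
--
--         # Skip other flags
--         if t.startswith("-"):
--             i += 1
--             continue
--
--         # Non-flag argument
--         if not has_e_flag and not found_script:
--             # First non-flag is the script when no -e is used
--             found_script = True
--             i += 1
--             continue
--
--         # This is an input file
--         files.append(t)
--         i += 1
--
--     return files
-- ===== SOURCE B (Python) =====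
-- FLAGS_WITH_ARG = frozenset({"-e", "--expression", "-f", "--file"})
--
-- def _extract_inplace_files(tokens):
--     """Extract input files that will be modified by -i flag."""
--     has_e_flag = any(
--         t == "-e" or t == "--expression" or t.startswith("--expression=")
--         for t in tokens[1:]
--     )
--     # Build a "consumed" mask: consumed[j] is True when tokens[j] is eaten as
--     # the argument of a value-taking flag (or is the program name at index 0).
--     # A token is consumed iff the previous token is a value flag that is not
--     # itself consumed.
--     consumed = [True]
--     for t in tokens:
--         consumed.append(t in FLAGS_WITH_ARG and not consumed[-1])
--     # Positionals: tokens that are neither consumed nor dash-prefixed.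
--     positional = [t for t, c in zip(tokens, consumed) if not c and not t.startswith("-")]
--     # Without -e the first positional is the sed script, not a file.
--     return positional if has_e_flag else positional[1:]
-- ===== Notes on version B (the rewrite author's own statement) =====
-- stated objective: alternative
-- what changed: B drops A's stateful index walk (i+=2 skips, found_script flag) and instead builds a boolean consumed-by-value-flag mask with a running recurrence, extracts positionals with a zip-filter comprehension over token/mask pairs, and removes the script with a final [1:] slice when -e is absent.
import Mathlib
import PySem

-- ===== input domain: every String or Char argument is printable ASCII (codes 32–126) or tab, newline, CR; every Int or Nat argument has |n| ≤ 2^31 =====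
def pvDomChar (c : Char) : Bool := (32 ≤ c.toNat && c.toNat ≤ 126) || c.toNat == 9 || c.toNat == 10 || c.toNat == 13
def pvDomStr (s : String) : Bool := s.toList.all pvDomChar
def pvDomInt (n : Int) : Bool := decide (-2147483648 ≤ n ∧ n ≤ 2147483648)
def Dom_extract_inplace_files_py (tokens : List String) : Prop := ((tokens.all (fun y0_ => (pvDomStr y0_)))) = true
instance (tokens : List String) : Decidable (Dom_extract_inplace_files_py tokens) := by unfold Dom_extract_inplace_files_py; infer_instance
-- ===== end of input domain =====

-- B replaces A's stateful index walk (i += 2 skips, found_script flag) by building a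
-- boolean "consumed by a value flag" mask with a running recurrence, then a zip-filter
-- for the positionals and a final [1:] slice for the script (objective: simpler).

-- ===== PORT A =====
-- A's first pass: for-with-break over tokens[1:] setting has_e_flag
def pvAHasE : List String → Bool
  | [] => false
  | t :: rest =>
    if t == "-e" || t == "--expression" || PySem.Str.startswith t "--expression=" then true
    else pvAHasE rest

-- A's second pass: the while loop over index i with found_script and files state
def pvALoop (tokens : List String) (has_e : Bool) (i : Nat) (found_script : Bool)
    (files : List String) : List String :=
  if h : i < tokens.length then
    let t := tokens[i]
    if t == "-e" || t == "--expression" || t == "-f" || t == "--file" then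
      pvALoop tokens has_e (i + 2) found_script files
    else if PySem.Str.startswith t "--expression=" || PySem.Str.startswith t "--file=" then
      pvALoop tokens has_e (i + 1) found_script files
    else if t == "-i" || PySem.Str.startswith t "-i" || PySem.Str.startswith t "--in-place" then
      pvALoop tokens has_e (i + 1) found_script files
    else if PySem.Str.startswith t "-" then
      pvALoop tokens has_e (i + 1) found_script files
    else if !has_e && !found_script then
      pvALoop tokens has_e (i + 1) true files
    else
      pvALoop tokens has_e (i + 1) found_script (files ++ [t])
  else files
termination_by tokens.length - i

def extract_inplace_files_py (tokens : List String) : List String :=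
  pvALoop tokens (pvAHasE (PySem.List.slice tokens (some 1) none)) 1 false []

-- ===== PORT B =====
-- t in FLAGS_WITH_ARG
def pvIsFlagArg (t : String) : Bool :=
  t == "-e" || t == "--expression" || t == "-f" || t == "--file"

def extract_inplace_files_py_alt (tokens : List String) : List String :=
  let has_e_flag := (PySem.List.slice tokens (some 1) none).any
    (fun t => t == "-e" || t == "--expression" || PySem.Str.startswith t "--expression=")
  -- consumed mask by the running recurrence; consumed[-1] read with getLastD
  -- (the accumulator starts as [true] and only grows, so it is never empty)
  let consumed := tokens.foldl
    (fun c t => c ++ [pvIsFlagArg t && !(c.getLastD true)]) [true]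
  -- the comprehension: zip truncates to tokens' length, filter, project the token
  let positional := ((tokens.zip consumed).filter
    (fun p => !p.2 && !PySem.Str.startswith p.1 "-")).map Prod.fst
  if has_e_flag then positional else PySem.List.slice positional (some 1) none

-- ===== PRECONDITION & SPEC =====
def Spec_extract_inplace_files_py (tokens : List String) (out : List String) : Prop := out = extract_inplace_files_py_alt tokens
instance (tokens : List String) (out : List String) : Decidable (Spec_extract_inplace_files_py tokens out) := by unfold Spec_extract_inplace_files_py; infer_instance

-- ===== CLAIM (what is proved, stated in full; the proofs are below) =====
def Claim_equal_extract_inplace_files_py : Prop := ∀ (tokens : List String), Dom_extract_inplace_files_py tokens → Spec_extract_inplace_files_py tokens (extract_inplace_files_py tokens)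

-- ===== LEMMAS AND PROOFS =====

-- the tail of B's consumed mask, as a structural recursion (b = consumed flag of the previous token)
def pvMaskFrom (b : Bool) : List String → List Bool
  | [] => []
  | t :: rest => (pvIsFlagArg t && !b) :: pvMaskFrom (pvIsFlagArg t && !b) rest

-- the positionals among ts when the head's consumed flag is c
def pvZF (c : Bool) : List String → List String
  | [] => []
  | t :: rest => (if !c && !PySem.Str.startswith t "-" then [t] else [])
      ++ pvZF (pvIsFlagArg t && !c) rest

-- a for-with-break equals List.any
theorem pvAHasE_eq_any (xs : List String) :
    pvAHasE xs = xs.any (fun t => t == "-e" || t == "--expression" || PySem.Str.startswith t "--expression=") := by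
  induction xs with
  | nil => rfl
  | cons t rest ih =>
    simp only [pvAHasE, List.any_cons]
    split <;> simp_all

-- B's foldl builds exactly the recurrence pvMaskFrom
theorem pv_mask_foldl (ts : List String) :
    ∀ (acc : List Bool) (x : Bool),
      ts.foldl (fun c t => c ++ [pvIsFlagArg t && !(c.getLastD true)]) (acc ++ [x])
        = acc ++ x :: pvMaskFrom x ts := by
  induction ts with
  | nil => intro acc x; simp [pvMaskFrom]
  | cons t rest ih =>
    intro acc x
    simp only [List.foldl_cons, List.getLastD_concat, pvMaskFrom]
    rw [ih (acc ++ [x]) (pvIsFlagArg t && !x)]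
    simp

-- the zip-filter-map comprehension equals pvZF
theorem pv_zip_filter (ts : List String) :
    ∀ (b : Bool),
      (((ts.zip (b :: pvMaskFrom b ts)).filter
          (fun p => !p.2 && !PySem.Str.startswith p.1 "-")).map Prod.fst) = pvZF b ts := by
  induction ts with
  | nil => intro b; rfl
  | cons t rest ih =>
    intro b
    simp only [pvMaskFrom, List.zip_cons_cons, List.filter_cons]
    by_cases hc : (!b && !PySem.Str.startswith t "-") = true
    · rw [if_pos (by simpa using hc), List.map_cons, ih]
      simp only [Bool.and_eq_true, Bool.not_eq_true'] at hc
      have hs : PySem.Chars.startswith t.toList ['-'] = false := by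
        simpa [PySem.Str.startswith_eq] using hc.2
      simp [pvZF, hc.1, hs]
    · rw [if_neg (by simpa using hc), ih]
      simp only [pvZF]
      rw [if_neg hc, List.nil_append]
  
theorem pvZF_true (l : List String) : pvZF true l = pvZF false l.tail := by
  cases l with
  | nil => rfl
  | cons t rest => simp [pvZF]

-- any string starting with a longer dash-flag also starts with "-"
theorem pv_sw_dash (t p : String) (hp : ("-".toList) <+: p.toList) :
    PySem.Str.startswith t p = true → PySem.Str.startswith t "-" = true := by
  simp only [PySem.Str.startswith_eq, PySem.Chars.startswith_iff]
  exact fun h => hp.trans h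

-- every value flag starts with "-"
theorem pv_flagArg_dash (t : String) :
    pvIsFlagArg t = true → PySem.Str.startswith t "-" = true := by
  intro h
  unfold pvIsFlagArg at h
  rcases Bool.or_eq_true_iff.mp h with h | h
  · rcases Bool.or_eq_true_iff.mp h with h | h
    · rcases Bool.or_eq_true_iff.mp h with h | h
      · have : t = "-e" := by simpa using h
        subst this; decide
      · have : t = "--expression" := by simpa using h
        subst this; decide
    · have : t = "-f" := by simpa using h
      subst this; decide
  · have : t = "--file" := by simpa using h
    subst this; decide

-- every one-token flag A skips starts with "-"
theorem pv_flags_dash (t : String)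
    (hnd : ¬ PySem.Str.startswith t "-" = true) :
    ¬ (PySem.Str.startswith t "--expression=" || PySem.Str.startswith t "--file=") = true ∧
    ¬ (t == "-i" || PySem.Str.startswith t "-i" || PySem.Str.startswith t "--in-place") = true := by
  constructor
  · intro h
    rcases Bool.or_eq_true_iff.mp h with h | h
    · exact hnd (pv_sw_dash t _ (by decide) h)
    · exact hnd (pv_sw_dash t _ (by decide) h)
  · intro h
    rcases Bool.or_eq_true_iff.mp h with h | h
    · rcases Bool.or_eq_true_iff.mp h with h | h
      · have ht : t = "-i" := by simpa using h
        subst ht; exact hnd (by decide)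
      · exact hnd (pv_sw_dash t _ (by decide) h)
    · exact hnd (pv_sw_dash t _ (by decide) h)

-- with has_e true or found_script true, A's walk from index i yields pvZF false on the suffix
theorem pvALoop_eq (tokens : List String) (has_e found_script : Bool)
    (hk : has_e = true ∨ found_script = true) :
    ∀ n i files, tokens.length - i ≤ n →
      pvALoop tokens has_e i found_script files = files ++ pvZF false (tokens.drop i) := by
  intro n
  induction n with
  | zero =>
    intro i files h
    have hi : ¬ i < tokens.length := by omega
    rw [pvALoop, List.drop_eq_nil_of_le (by omega)]
    simp [hi, pvZF]
  | succ n ih =>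
    intro i files h
    rw [pvALoop]
    by_cases hi : i < tokens.length
    · simp only [hi, dite_true]
      rw [List.drop_eq_getElem_cons hi]
      simp only [pvZF]
      by_cases h1 : (tokens[i] == "-e" || tokens[i] == "--expression" || tokens[i] == "-f" || tokens[i] == "--file") = true
      · have hfa : pvIsFlagArg tokens[i] = true := h1
        have hd : PySem.Str.startswith tokens[i] "-" = true := pv_flagArg_dash _ hfa
        rw [if_pos h1, ih (i + 2) files (by omega),
          if_neg (by simpa [PySem.Str.startswith_eq] using hd), hfa, List.nil_append]
        rw [Bool.not_false, Bool.and_true, pvZF_true, List.tail_drop]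
      · have hfa : pvIsFlagArg tokens[i] = false := by
          unfold pvIsFlagArg; exact Bool.of_not_eq_true h1
        rw [if_neg h1]
        by_cases hd : PySem.Str.startswith tokens[i] "-" = true
        · have hskip : files ++ pvZF false (tokens.drop (i + 1)) =
              files ++ ((if (!false && !PySem.Str.startswith tokens[i] "-") = true
                  then [tokens[i]] else []) ++
                pvZF (pvIsFlagArg tokens[i] && !false) (tokens.drop (i + 1))) := by
            rw [if_neg (by simpa [PySem.Str.startswith_eq] using hd), hfa, List.nil_append, Bool.false_and]
          by_cases h2 : (PySem.Str.startswith tokens[i] "--expression=" || PySem.Str.startswith tokens[i] "--file=") = true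
          · rw [if_pos h2, ih (i + 1) files (by omega)]; exact hskip
          · rw [if_neg h2]
            by_cases h3 : (tokens[i] == "-i" || PySem.Str.startswith tokens[i] "-i" || PySem.Str.startswith tokens[i] "--in-place") = true
            · rw [if_pos h3, ih (i + 1) files (by omega)]; exact hskip
            · rw [if_neg h3, if_pos hd, ih (i + 1) files (by omega)]; exact hskip
        · obtain ⟨h2, h3⟩ := pv_flags_dash tokens[i] hd
          rw [if_neg h2, if_neg h3, if_neg hd]
          have hfs : ¬ (!has_e && !found_script) = true := by
            rcases hk with hk | hk <;> simp [hk]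
          rw [if_neg hfs, ih (i + 1) (files ++ [tokens[i]]) (by omega)]
          rw [if_pos (by simpa [PySem.Str.startswith_eq] using Bool.of_not_eq_true hd), hfa, Bool.false_and]
          simp
    · rw [List.drop_eq_nil_of_le (by omega)]
      simp [hi, pvZF]

-- with has_e false and not yet found, A's walk drops the first positional of the suffix
theorem pvALoop_false (tokens : List String) :
    ∀ n i files, tokens.length - i ≤ n →
      pvALoop tokens false i false files = files ++ (pvZF false (tokens.drop i)).tail := by
  intro n
  induction n with
  | zero =>
    intro i files h
    have hi : ¬ i < tokens.length := by omega
    rw [pvALoop, List.drop_eq_nil_of_le (by omega)]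
    simp [hi, pvZF]
  | succ n ih =>
    intro i files h
    rw [pvALoop]
    by_cases hi : i < tokens.length
    · simp only [hi, dite_true]
      rw [List.drop_eq_getElem_cons hi]
      simp only [pvZF]
      by_cases h1 : (tokens[i] == "-e" || tokens[i] == "--expression" || tokens[i] == "-f" || tokens[i] == "--file") = true
      · have hfa : pvIsFlagArg tokens[i] = true := h1
        have hd : PySem.Str.startswith tokens[i] "-" = true := pv_flagArg_dash _ hfa
        rw [if_pos h1, ih (i + 2) files (by omega),
          if_neg (by simpa [PySem.Str.startswith_eq] using hd), hfa, List.nil_append]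
        rw [Bool.not_false, Bool.and_true, pvZF_true, List.tail_drop]
      · have hfa : pvIsFlagArg tokens[i] = false := by
          unfold pvIsFlagArg; exact Bool.of_not_eq_true h1
        rw [if_neg h1]
        by_cases hd : PySem.Str.startswith tokens[i] "-" = true
        · have hskip : files ++ (pvZF false (tokens.drop (i + 1))).tail =
              files ++ ((if (!false && !PySem.Str.startswith tokens[i] "-") = true
                  then [tokens[i]] else []) ++
                pvZF (pvIsFlagArg tokens[i] && !false) (tokens.drop (i + 1))).tail := by
            rw [if_neg (by simpa [PySem.Str.startswith_eq] using hd), hfa, List.nil_append, Bool.false_and]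
          by_cases h2 : (PySem.Str.startswith tokens[i] "--expression=" || PySem.Str.startswith tokens[i] "--file=") = true
          · rw [if_pos h2, ih (i + 1) files (by omega)]; exact hskip
          · rw [if_neg h2]
            by_cases h3 : (tokens[i] == "-i" || PySem.Str.startswith tokens[i] "-i" || PySem.Str.startswith tokens[i] "--in-place") = true
            · rw [if_pos h3, ih (i + 1) files (by omega)]; exact hskip
            · rw [if_neg h3, if_pos hd, ih (i + 1) files (by omega)]; exact hskip
        · obtain ⟨h2, h3⟩ := pv_flags_dash tokens[i] hd
          rw [if_neg h2, if_neg h3, if_neg hd]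
          rw [if_pos (by simp : (!false && !false) = true)]
          -- A marks the script and never emits it; pvZF emits it and the tail removes it
          rw [pvALoop_eq tokens false true (Or.inr rfl) n (i + 1) files (by omega)]
          rw [if_pos (by simpa [PySem.Str.startswith_eq] using Bool.of_not_eq_true hd), hfa, Bool.false_and]
          simp
    · rw [List.drop_eq_nil_of_le (by omega)]
      simp [hi, pvZF]

-- B's positional list equals pvZF true over the whole token list
theorem pv_positional_eq (tokens : List String) :
    ((tokens.zip (tokens.foldl
        (fun c t => c ++ [pvIsFlagArg t && !(c.getLastD true)]) [true])).filter
      (fun p => !p.2 && !PySem.Str.startswith p.1 "-")).map Prod.fst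
      = pvZF true tokens := by
  have hmask := pv_mask_foldl tokens [] true
  simp only [List.nil_append] at hmask
  rw [hmask, pv_zip_filter]

-- ===== VERDICT (by name: the statement is the Claim_ definition above) =====
theorem extract_inplace_files_py_spec : Claim_equal_extract_inplace_files_py := by
  intro tokens _
  unfold Spec_extract_inplace_files_py extract_inplace_files_py extract_inplace_files_py_alt
  rw [pvAHasE_eq_any]
  cases he : (PySem.List.slice tokens (some 1) none).any
      (fun t => t == "-e" || t == "--expression" || PySem.Str.startswith t "--expression=") with
  | true =>
    simp only [if_true]
    rw [pvALoop_eq tokens true false (Or.inl rfl) (tokens.length - 1) 1 [] (by omega)]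
    rw [pv_positional_eq, pvZF_true, List.nil_append, ← List.drop_one]
  | false =>
    simp only [Bool.false_eq_true, if_false]
    rw [pvALoop_false tokens (tokens.length - 1) 1 [] (by omega)]
    rw [pv_positional_eq, pvZF_true, List.nil_append, PySem.List.slice_from_one]
    simp [List.drop_one]
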